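-- pv_equiv track=rewrite | github.com/odylith/odylith | src/odylith/runtime/memory/odylith_remote_retrieval.py | _dedupe_documents
-- ===== SOURCE A (Python) =====
-- from typing import Any, Mapping, Sequence
--
-- def _dedupe_documents(documents: Sequence[Mapping[str, Any]]) -> list[dict[str, Any]]:
--     deduped: dict[str, dict[str, Any]] = {}
--     for row in documents:
--         if not isinstance(row, Mapping):
--             continue
--         doc_key = str(row.get("doc_key", "")).strip()
--         if not doc_key:
--             continue
--         deduped[doc_key] = dict(row)
--     return [deduped[key] for key in sorted(deduped)]
-- ===== SOURCE B (Python) =====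
-- from typing import Any, Mapping, Sequence
--
--
-- def _dedupe_documents(documents: Sequence[Mapping[str, Any]]) -> list[dict[str, Any]]:
--     pairs = []
--     for row in documents:
--         if not isinstance(row, Mapping):
--             continue
--         key = str(row.get("doc_key", "")).strip()
--         if key:
--             pairs.append((key, dict(row)))
--     pairs.sort(key=lambda kv: kv[0])  # stable: equal keys keep original order
--     out = []
--     for i, (key, row) in enumerate(pairs):
--         if i + 1 == len(pairs) or pairs[i + 1][0] != key:
--             out.append(row)
--     return out
-- ===== Notes on version B (the rewrite author's own statement) =====
-- stated objective: alternative
-- what changed: Replaces the dict-overwrite-then-sorted-keys-then-lookup approach by collecting (key, row) pairs, stably sorting them by key, and keeping only the last pair of each equal-key run (last-wins via sort stability); no dict is built.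
import Mathlib
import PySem

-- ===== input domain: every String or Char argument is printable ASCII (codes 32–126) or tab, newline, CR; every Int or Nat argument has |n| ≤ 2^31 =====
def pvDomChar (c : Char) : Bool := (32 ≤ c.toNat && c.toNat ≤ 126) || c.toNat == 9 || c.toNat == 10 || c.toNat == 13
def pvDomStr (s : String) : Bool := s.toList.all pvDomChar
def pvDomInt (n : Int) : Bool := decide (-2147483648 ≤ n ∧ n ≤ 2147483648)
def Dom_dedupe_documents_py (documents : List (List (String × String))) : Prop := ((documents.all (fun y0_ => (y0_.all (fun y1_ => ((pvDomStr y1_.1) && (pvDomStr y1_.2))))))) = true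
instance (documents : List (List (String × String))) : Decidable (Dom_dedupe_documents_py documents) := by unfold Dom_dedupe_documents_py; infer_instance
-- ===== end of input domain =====

-- Port A builds a dict keyed by stripped doc_key (last wins) and emits sorted-key lookups; B instead
-- stably sorts the valid (key, row) pairs and keeps the last pair of every equal-key run (alternative
-- decomposition, same cost).


-- ===== PORT A =====
-- literal port of A: a dict-overwrite loop (the `isinstance(row, Mapping)` guard is always true for
-- the declared input type), then a sorted-key lookup comprehension; `deduped[key]` always succeeds,
-- ported as getD with an unreachable default.
def dedupe_documents_py (documents : List (List (String × String))) : List (List (String × String)) :=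
  let deduped : PySem.Dict String (List (String × String)) :=
    documents.foldl (fun d row =>
      let doc_key := PySem.Str.strip ((PySem.Dict.mk row).getD "doc_key" "")
      if doc_key = "" then d else d.insert doc_key row) PySem.Dict.empty
  (PySem.List.sorted deduped.keys (fun k => k) false).map (fun key => deduped.getD key [])

-- ===== PORT B =====
-- B-side helper: keep, for each run of equal keys in an already-sorted pair list, only the last pair.
def pvDedupeLast : List (String × List (String × String)) → List (List (String × String))
  | [] => []
  | [p] => [p.2]
  | p :: q :: rest => if p.1 = q.1 then pvDedupeLast (q :: rest) else p.2 :: pvDedupeLast (q :: rest)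

def dedupe_documents_py_alt (documents : List (List (String × String))) : List (List (String × String)) :=
  let pairs : List (String × List (String × String)) :=
    documents.foldl (fun acc row =>
      let key := PySem.Str.strip ((PySem.Dict.mk row).getD "doc_key" "")
      if key = "" then acc else acc ++ [(key, row)]) []
  pvDedupeLast (PySem.List.sorted pairs (fun kv => kv.1) false)

-- ===== PRECONDITION & SPEC =====
def Spec_dedupe_documents_py (documents : List (List (String × String))) (out : List (List (String × String))) : Prop := out = dedupe_documents_py_alt documents
instance (documents : List (List (String × String))) (out : List (List (String × String))) : Decidable (Spec_dedupe_documents_py documents out) := by unfold Spec_dedupe_documents_py; infer_instance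

-- ===== CLAIM (what is proved, stated in full; the proofs are below) =====
def Claim_equal_dedupe_documents_py : Prop := ∀ (documents : List (List (String × String))), Dom_dedupe_documents_py documents → Spec_dedupe_documents_py documents (dedupe_documents_py documents)

-- ===== LEMMAS AND PROOFS =====

-- the valid (key, row) pairs, in document order
def pvPairs (documents : List (List (String × String))) : List (String × List (String × String)) :=
  documents.filterMap (fun row =>
    let k := PySem.Str.strip ((PySem.Dict.mk row).getD "doc_key" "")
    if k = "" then none else some (k, row))

-- the last row stored under key k (last-occurrence wins), as a fold
def pvLastVal (ps : List (String × List (String × String))) (k : String) : List (String × String) :=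
  ps.foldl (fun acc p => if p.1 = k then p.2 else acc) []

def pvSortedKeys (ps : List (String × List (String × String))) : List String :=
  PySem.List.sorted (PySem.Set.ofList (ps.map (·.1))) (fun k => k) false

def pvCanon (ps : List (String × List (String × String))) : List (List (String × String)) :=
  (pvSortedKeys ps).map (fun k => pvLastVal ps k)

theorem pv_foldA_eq (documents : List (List (String × String)))
    (d : PySem.Dict String (List (String × String))) :
    documents.foldl (fun d row =>
      let doc_key := PySem.Str.strip ((PySem.Dict.mk row).getD "doc_key" "")
      if doc_key = "" then d else d.insert doc_key row) d
    = (pvPairs documents).foldl (fun d p => d.insert p.1 p.2) d := by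
  induction documents generalizing d with
  | nil => simp [pvPairs]
  | cons row rest ih =>
    simp only [List.foldl_cons, pvPairs, List.filterMap_cons]
    by_cases hk : PySem.Str.strip ((PySem.Dict.mk row).getD "doc_key" "") = ""
    · simp only [hk, if_true]
      exact ih d
    · simp only [if_neg hk, List.foldl_cons]
      exact ih _

theorem pv_foldB_eq (documents : List (List (String × String)))
    (acc : List (String × List (String × String))) :
    documents.foldl (fun acc row =>
      let key := PySem.Str.strip ((PySem.Dict.mk row).getD "doc_key" "")
      if key = "" then acc else acc ++ [(key, row)]) acc
    = acc ++ pvPairs documents := by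
  induction documents generalizing acc with
  | nil => simp [pvPairs]
  | cons row rest ih =>
    simp only [List.foldl_cons, pvPairs, List.filterMap_cons]
    by_cases hk : PySem.Str.strip ((PySem.Dict.mk row).getD "doc_key" "") = ""
    · simp only [hk, if_true]
      exact ih acc
    · simp only [if_neg hk]
      rw [ih]
      simp [pvPairs]

theorem pv_getD_fold (ps : List (String × List (String × String)))
    (d : PySem.Dict String (List (String × String))) (k : String) :
    (ps.foldl (fun d p => d.insert p.1 p.2) d).getD k []
    = ps.foldl (fun acc p => if p.1 = k then p.2 else acc) (d.getD k []) := by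
  induction ps generalizing d with
  | nil => simp
  | cons p rest ih =>
    simp only [List.foldl_cons]
    rw [ih]
    rw [PySem.Dict.getD_insert]
    by_cases h : p.1 = k
    · simp [h]
    · simp [h, Ne.symm h]

theorem pv_keys_fold (ps : List (String × List (String × String))) :
    (ps.foldl (fun d p => d.insert p.1 p.2) PySem.Dict.empty).keys
    = PySem.Set.ofList (ps.map (·.1)) := by
  rw [PySem.Dict.keys_foldl_insert_key (key := fun p : String × List (String × String) => p.1)
      (f := fun _ p => p.2)]
  simp [PySem.Set.update_nil_left]

theorem pv_A_canon (documents : List (List (String × String))) :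
    dedupe_documents_py documents = pvCanon (pvPairs documents) := by
  unfold dedupe_documents_py pvCanon pvSortedKeys pvLastVal
  dsimp only
  rw [pv_foldA_eq, pv_keys_fold]
  apply List.map_congr_left
  intro k _
  rw [pv_getD_fold]
  simp

-- fold-with-init helpers for pvLastVal
theorem pv_fold_noocc (l : List (String × List (String × String))) (i : List (String × String))
    (k : String) (h : ∀ a ∈ l, a.1 ≠ k) :
    l.foldl (fun acc p => if p.1 = k then p.2 else acc) i = i := by
  induction l generalizing i with
  | nil => rfl
  | cons a t ih =>
    simp only [List.foldl_cons]
    rw [if_neg (h a (by simp))]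
    exact ih i (fun b hb => h b (by simp [hb]))

theorem pv_fold_occ (l : List (String × List (String × String))) (i i' : List (String × String))
    (k : String) (h : ∃ a ∈ l, a.1 = k) :
    l.foldl (fun acc p => if p.1 = k then p.2 else acc) i
    = l.foldl (fun acc p => if p.1 = k then p.2 else acc) i' := by
  induction l generalizing i i' with
  | nil => simp at h
  | cons a t ih =>
    simp only [List.foldl_cons]
    by_cases ha : a.1 = k
    · simp [ha]
    · rcases h with ⟨b, hb, hbk⟩
      rcases List.mem_cons.mp hb with rfl | hbt
      · exact absurd hbk ha
      · exact ih _ _ ⟨b, hbt, hbk⟩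

-- inserting p into a key-sorted list: the last value at p.1 becomes p.2, other keys unchanged
theorem pv_insertBy_lastVal (p : String × List (String × String))
    (qs : List (String × List (String × String))) (i : List (String × String)) (k : String)
    (h : qs.Pairwise (fun a b => a.1 ≤ b.1)) :
    (PySem.List.insertBy (fun a b => decide ((fun kv : String × List (String × String) => kv.1) a < (fun kv : String × List (String × String) => kv.1) b)) p qs).foldl
      (fun acc q => if q.1 = k then q.2 else acc) i
    = if p.1 = k then p.2 else qs.foldl (fun acc q => if q.1 = k then q.2 else acc) i := by
  induction qs generalizing i with
  | nil =>
    simp only [PySem.List.insertBy, List.foldl_cons, List.foldl_nil]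
  | cons q t ih =>
    simp only [PySem.List.insertBy]
    by_cases hlt : p.1 < q.1
    · simp only [decide_eq_true_eq, if_pos hlt, List.foldl_cons]
      by_cases hpk : p.1 = k
      · rw [if_pos hpk, if_pos hpk,
          if_neg (hpk ▸ ne_of_gt hlt : ¬ q.1 = k)]
        exact pv_fold_noocc t p.2 k
          (fun a ha => hpk ▸ ne_of_gt (lt_of_lt_of_le hlt ((List.pairwise_cons.mp h).1 a ha)))
      · rw [if_neg hpk, if_neg hpk]
    · simp only [decide_eq_true_eq, if_neg hlt, List.foldl_cons]
      rw [ih _ (List.Pairwise.of_cons h)]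

-- stability: sorting by key does not change which value is last under each key
theorem pv_lastVal_sorted (ps : List (String × List (String × String))) (k : String) :
    pvLastVal (PySem.List.sorted ps (fun kv => kv.1) false) k = pvLastVal ps k := by
  induction ps using List.reverseRecOn with
  | nil => rfl
  | append_singleton ps p ih =>
    unfold pvLastVal
    rw [PySem.List.sorted_eq_foldl_insertBy, List.foldl_append, List.foldl_cons, List.foldl_nil,
      ← PySem.List.sorted_eq_foldl_insertBy]
    rw [pv_insertBy_lastVal p _ _ k (PySem.List.sorted_pairwise ps (fun kv => kv.1))]
    rw [List.foldl_append, List.foldl_cons, List.foldl_nil]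
    unfold pvLastVal at ih
    rw [ih]

-- equal key membership gives the same sorted distinct-key list
theorem pv_sortedKeys_ext (ps qs : List (String × List (String × String)))
    (h : ∀ a : String, a ∈ ps.map (·.1) ↔ a ∈ qs.map (·.1)) : pvSortedKeys ps = pvSortedKeys qs := by
  unfold pvSortedKeys
  apply PySem.List.sorted_eq_sorted_of_perm _ _ _ (fun a b hab => hab)
  rw [List.perm_ext_iff_of_nodup (PySem.Set.nodup_ofList _) (PySem.Set.nodup_ofList _)]
  intro a
  rw [PySem.Set.mem_ofList, PySem.Set.mem_ofList]
  exact h a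

-- main B-side lemma: on a key-sorted list, keep-last-of-run = sorted distinct keys mapped to last values
theorem pv_dedupeLast_canon (qs : List (String × List (String × String)))
    (h : qs.Pairwise (fun a b => a.1 ≤ b.1)) : pvDedupeLast qs = pvCanon qs := by
  induction qs with
  | nil => rfl
  | cons p rest ih =>
    cases rest with
    | nil =>
      have hs : pvSortedKeys [p] = [p.1] := by
        unfold pvSortedKeys
        simp only [List.map_cons, List.map_nil]
        rw [PySem.Set.ofList_eq_self_of_nodup _ (List.nodup_singleton _)]
        exact PySem.List.sorted_eq_of_perm_of_pairwise_lt _ _ _ (List.Perm.refl _)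
          (List.pairwise_singleton _ _)
      unfold pvCanon
      rw [hs]
      simp [pvDedupeLast, pvLastVal]
    | cons q t =>
      have hd := (List.pairwise_cons.mp h).1
      have h' := (List.pairwise_cons.mp h).2
      by_cases hk : p.1 = q.1
      · rw [show pvDedupeLast (p :: q :: t) = pvDedupeLast (q :: t) by
          simp [pvDedupeLast, hk]]
        rw [ih h']
        unfold pvCanon
        rw [← pv_sortedKeys_ext (q :: t) (p :: q :: t)
          (fun a => by simp only [List.map_cons, List.mem_cons, hk]; tauto)]
        apply List.map_congr_left
        intro k hkmem
        unfold pvSortedKeys at hkmem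
        rw [PySem.List.mem_sorted, PySem.Set.mem_ofList, List.mem_map] at hkmem
        obtain ⟨b, hb, hbk⟩ := hkmem
        unfold pvLastVal
        rw [List.foldl_cons (l := q :: t) (b := [])]
        exact pv_fold_occ (q :: t) [] _ k ⟨b, hb, hbk⟩
      · have hlt : p.1 < q.1 := lt_of_le_of_ne (hd q (List.mem_cons_self)) hk
        have hnotin : ∀ a ∈ q :: t, p.1 < a.1 := by
          intro a ha
          rcases List.mem_cons.mp ha with rfl | hat
          · exact hlt
          · exact lt_of_lt_of_le hlt ((List.pairwise_cons.mp h').1 a hat)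
        have hkeys : pvSortedKeys (p :: q :: t) = p.1 :: pvSortedKeys (q :: t) := by
          unfold pvSortedKeys
          apply PySem.List.sorted_eq_of_perm_of_pairwise_lt
          · rw [List.perm_ext_iff_of_nodup
              (List.nodup_cons.mpr ⟨fun hm => by
                rw [PySem.List.mem_sorted, PySem.Set.mem_ofList, List.mem_map] at hm
                obtain ⟨b, hb, hbk⟩ := hm
                exact absurd (hbk ▸ hnotin b hb) (lt_irrefl p.1),
                ((PySem.List.sorted_perm _ _ _).nodup_iff).mpr (PySem.Set.nodup_ofList _)⟩)
              (PySem.Set.nodup_ofList _)]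
            intro a
            simp [PySem.List.mem_sorted, PySem.Set.mem_ofList]
          · refine List.pairwise_cons.mpr ⟨fun a ha => ?_, PySem.List.sorted_ofList_pairwise_lt _⟩
            rw [PySem.List.mem_sorted, PySem.Set.mem_ofList, List.mem_map] at ha
            obtain ⟨b, hb, hbk⟩ := ha
            exact hbk ▸ hnotin b hb
        rw [show pvDedupeLast (p :: q :: t) = p.2 :: pvDedupeLast (q :: t) by
          simp [pvDedupeLast, hk]]
        rw [ih h']
        unfold pvCanon
        rw [hkeys, List.map_cons]
        congr 1
        · unfold pvLastVal
          rw [List.foldl_cons (l := q :: t) (b := []), if_pos rfl]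
          exact (pv_fold_noocc (q :: t) p.2 p.1 (fun a ha => (ne_of_gt (hnotin a ha)))).symm
        · apply List.map_congr_left
          intro k hkmem
          unfold pvSortedKeys at hkmem
          rw [PySem.List.mem_sorted, PySem.Set.mem_ofList, List.mem_map] at hkmem
          obtain ⟨b, hb, hbk⟩ := hkmem
          unfold pvLastVal
          rw [List.foldl_cons (l := q :: t) (b := []),
            if_neg (fun e => absurd (e ▸ hbk ▸ hnotin b hb) (lt_irrefl _))]

theorem pv_B_canon (documents : List (List (String × String))) :
    dedupe_documents_py_alt documents = pvCanon (pvPairs documents) := by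
  unfold dedupe_documents_py_alt
  dsimp only
  rw [pv_foldB_eq, List.nil_append]
  rw [pv_dedupeLast_canon _ (PySem.List.sorted_pairwise (pvPairs documents) (fun kv => kv.1))]
  unfold pvCanon
  rw [pv_sortedKeys_ext (PySem.List.sorted (pvPairs documents) (fun kv => kv.1) false)
      (pvPairs documents)
      (fun a => by
        constructor <;> intro ha <;> rcases List.mem_map.mp ha with ⟨b, hb, rfl⟩ <;>
          exact List.mem_map.mpr ⟨b, by simpa [PySem.List.mem_sorted] using hb, rfl⟩)]
  apply List.map_congr_left
  intro k _
  exact pv_lastVal_sorted (pvPairs documents) k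

-- ===== VERDICT (by name: the statement is the Claim_ definition above) =====
theorem dedupe_documents_py_spec : Claim_equal_dedupe_documents_py := by
  intro documents _
  unfold Spec_dedupe_documents_py
  rw [pv_A_canon, pv_B_canon]
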